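-- pv_equiv track=rewrite | github.com/starseed2021/viewing-party | viewing_party/party.py | watch_movie
-- ===== SOURCE A (Python) =====
-- def watch_movie(user_data, title):
--     movies_watched = user_data["watched"]
--     movies_to_watch = user_data["watchlist"]
--     remove_list = []
--
--     for movie in movies_to_watch:
--         if title == movie["title"]:
--             movies_watched.append(movie)
--             remove_list.append(movie)
--
--
--     for movie in remove_list:
--         movies_to_watch.remove(movie)
--
--     return user_data
-- ===== SOURCE B (Python) =====
-- def watch_movie(user_data, title):
--     watchlist = user_data["watchlist"]
--     matches = [m for m in watchlist if m["title"] == title]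
--     user_data["watched"].extend(matches)
--     watchlist[:] = [m for m in watchlist if m["title"] != title]
--     return user_data
-- ===== Notes on version B (the rewrite author's own statement) =====
-- stated objective: simpler
-- what changed: B replaces A's two-phase append-then-rescan removal (a remove_list plus a loop of list.remove, each a linear scan) by a single partition of the watchlist into matches and non-matches with two comprehensions, extending watched and slice-assigning the watchlist in place.
import Mathlib
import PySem

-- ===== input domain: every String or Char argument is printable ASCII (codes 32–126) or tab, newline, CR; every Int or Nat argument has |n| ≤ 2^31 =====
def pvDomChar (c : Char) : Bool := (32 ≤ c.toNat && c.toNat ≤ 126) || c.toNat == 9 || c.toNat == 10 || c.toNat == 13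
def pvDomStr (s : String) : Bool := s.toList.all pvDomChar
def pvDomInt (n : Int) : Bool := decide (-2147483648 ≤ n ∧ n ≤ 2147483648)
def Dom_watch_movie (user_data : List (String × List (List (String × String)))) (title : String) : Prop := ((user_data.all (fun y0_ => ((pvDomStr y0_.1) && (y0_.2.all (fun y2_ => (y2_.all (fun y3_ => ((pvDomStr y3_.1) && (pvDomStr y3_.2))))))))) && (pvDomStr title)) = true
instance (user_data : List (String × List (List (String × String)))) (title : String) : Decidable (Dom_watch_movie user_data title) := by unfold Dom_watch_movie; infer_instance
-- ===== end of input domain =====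

-- B replaces A's append-then-rescan removal (remove_list + a loop of list.remove) by a single
-- partition of the watchlist into matches and non-matches; return-value equivalence is proved
-- (both Pythons also mutate user_data's lists in place, in the same way).

-- ===== PORT A =====
def watch_movie (user_data : List (String × List (List (String × String)))) (title : String) : List (String × List (List (String × String))) :=
  match (PySem.Dict.mk user_data).get? "watched", (PySem.Dict.mk user_data).get? "watchlist" with
  | some movies_watched, some movies_to_watch =>
      -- first loop: append matching movies to movies_watched and to remove_list
      -- (movie["title"] would raise KeyError when absent — those inputs are outside Pre_)
      let st := movies_to_watch.foldl
        (fun (acc : List (List (String × String)) × List (List (String × String))) movie =>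
          if (PySem.Dict.mk movie).get? "title" == some title then
            (acc.1 ++ [movie], acc.2 ++ [movie])
          else acc)
        (movies_watched, [])
      -- second loop: movies_to_watch.remove(movie) for each movie of remove_list
      -- (remove? = none would be Python's ValueError; unreachable, every remove_list element is present)
      let to_watch' := st.2.foldl
        (fun acc movie => (PySem.List.remove? acc movie).getD acc) movies_to_watch
      (((PySem.Dict.mk user_data).insert "watched" st.1).insert "watchlist" to_watch').items
  | _, _ => user_data   -- Python raises KeyError here; excluded by Pre_

-- ===== PORT B =====
def watch_movie_alt (user_data : List (String × List (List (String × String)))) (title : String) : List (String × List (List (String × String))) :=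
  match (PySem.Dict.mk user_data).get? "watched" with
  | none => user_data   -- Python raises KeyError here; excluded by Pre_
  | some wd =>
    match (PySem.Dict.mk user_data).get? "watchlist" with
    | none => user_data   -- Python raises KeyError here; excluded by Pre_
    | some wl =>
      let hits := wl.filter (fun m => (PySem.Dict.mk m).get? "title" == some title)
      let rest := wl.filter (fun m => !((PySem.Dict.mk m).get? "title" == some title))
      (((PySem.Dict.mk user_data).insert "watched" (wd ++ hits)).insert "watchlist" rest).items

-- ===== PRECONDITION & SPEC =====
-- Pre_ excludes inputs where the Python raises KeyError ("watched"/"watchlist" absent, or a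
-- watchlist movie without a "title" key), and association lists with duplicate keys (in
-- user_data or in a movie), which do not correspond to any Python dict input.
def Pre_watch_movie (user_data : List (String × List (List (String × String)))) (title : String) : Prop :=
  ((PySem.Dict.mk user_data).get? "watched").isSome = true ∧
  ((PySem.Dict.mk user_data).get? "watchlist").isSome = true ∧
  (∀ m ∈ ((PySem.Dict.mk user_data).get? "watchlist").getD [], ((PySem.Dict.mk m).get? "title").isSome = true) ∧
  (user_data.map Prod.fst).Nodup ∧
  (∀ p ∈ user_data, ∀ m ∈ p.2, (m.map Prod.fst).Nodup)
instance (user_data : List (String × List (List (String × String)))) (title : String) : Decidable (Pre_watch_movie user_data title) := by unfold Pre_watch_movie; infer_instance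

def pvWitness_watch_movie : (List (String × List (List (String × String)))) × String :=
  ([("watched", [[("title", "b")]]), ("watchlist", [[("title", "a"), ("year", "1999")]])], "a")

def Spec_watch_movie (user_data : List (String × List (List (String × String)))) (title : String) (out : List (String × List (List (String × String)))) : Prop := out = watch_movie_alt user_data title
instance (user_data : List (String × List (List (String × String)))) (title : String) (out : List (String × List (List (String × String)))) : Decidable (Spec_watch_movie user_data title out) := by unfold Spec_watch_movie; infer_instance

-- ===== CLAIM (what is proved, stated in full; the proofs are below) =====
def Claim_equal_watch_movie : Prop := ∀ (user_data : List (String × List (List (String × String)))) (title : String), Dom_watch_movie user_data title → Pre_watch_movie user_data title → Spec_watch_movie user_data title (watch_movie user_data title)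

-- ===== LEMMAS AND PROOFS =====

-- A's first loop accumulates: appended-to watched list and remove_list are both "filter p".
theorem pv_foldl_partition {α : Type} (p : α → Bool) :
    ∀ (l w r : List α),
      l.foldl (fun (acc : List α × List α) m =>
        if p m then (acc.1 ++ [m], acc.2 ++ [m]) else acc) (w, r)
      = (w ++ l.filter p, r ++ l.filter p) := by
  intro l
  induction l with
  | nil => simp
  | cons x l ih =>
    intro w r
    by_cases hx : p x
    · simp [List.foldl_cons, hx, ih]
    · simp [List.foldl_cons, hx, ih]

-- removing elements that all satisfy p leaves a head with ¬p untouched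
theorem pv_removeAll_cons {α : Type} [BEq α] [LawfulBEq α] (p : α → Bool) :
    ∀ (rs : List α) (x : α) (l : List α), (∀ y ∈ rs, p y = true) → p x = false →
      rs.foldl (fun acc m => (PySem.List.remove? acc m).getD acc) (x :: l)
      = x :: rs.foldl (fun acc m => (PySem.List.remove? acc m).getD acc) l := by
  intro rs
  induction rs with
  | nil => intro x l _ _; rfl
  | cons y rs ih =>
    intro x l hall hx
    have hne : x ≠ y := by
      intro h; rw [h] at hx; rw [hall y (by simp)] at hx; cases hx
    have hstep : (PySem.List.remove? (x :: l) y).getD (x :: l)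
        = x :: (PySem.List.remove? l y).getD l := by
      rw [PySem.List.remove?_cons_of_ne (h := hne)]
      cases h : PySem.List.remove? l y <;> simp
    simp only [List.foldl_cons, hstep]
    exact ih x _ (fun z hz => hall z (by simp [hz])) hx

-- A's second loop: removing every match of a list from the list itself keeps exactly the non-matches.
theorem pv_remove_filter {α : Type} [BEq α] [LawfulBEq α] (p : α → Bool) :
    ∀ (l : List α),
      (l.filter p).foldl (fun acc m => (PySem.List.remove? acc m).getD acc) l
      = l.filter (fun m => !p m) := by
  intro l
  induction l with
  | nil => rfl
  | cons x l ih =>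
    by_cases hx : p x
    · have h1 : (x :: l).filter p = x :: l.filter p := by simp [hx]
      rw [h1]
      simp only [List.foldl_cons, PySem.List.remove?_cons_self, Option.getD_some]
      rw [ih]
      simp [hx]
    · have h1 : (x :: l).filter p = l.filter p := by simp [hx]
      rw [h1, pv_removeAll_cons p (l.filter p) x l
            (fun y hy => (List.mem_filter.mp hy).2) (by simp [hx]), ih]
      simp [hx]

-- ===== VERDICT (by name: the statement is the Claim_ definition above) =====
theorem watch_movie_spec : Claim_equal_watch_movie := by
  intro user_data title _ _
  unfold Spec_watch_movie watch_movie watch_movie_alt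
  cases hwd : (PySem.Dict.mk user_data).get? "watched" with
  | none => cases hwl : (PySem.Dict.mk user_data).get? "watchlist" <;> rfl
  | some wd =>
    cases hwl : (PySem.Dict.mk user_data).get? "watchlist" with
    | none => rfl
    | some wl =>
      simp only
      rw [pv_foldl_partition (fun m => (PySem.Dict.mk m).get? "title" == some title) wl wd []]
      simp only [List.nil_append]
      rw [pv_remove_filter (fun m => (PySem.Dict.mk m).get? "title" == some title) wl]
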